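-- pv_equiv track=rewrite | github.com/dudamarlena/pyc_source | pycfiles/django_avem_theme-2.0.0-py2.py3-none-any/list_sample.cpython-36.py | list_sample_special
-- ===== SOURCE A (Python) =====
-- def list_sample_special(collection, special_item, special_name='you', limit=3):
--     """
--                 special version with 'special_name' as first extra item where applicable
--         """
--
--     def jcs(items):
--         return ', '.join(str(item) for item in items)
--
--     try:
--         collection.remove(special_item)
--         has_special = True
--         limit -= 1
--     except ValueError:
--         has_special = False
--
--     ln = len(collection)
--     if ln == 0:
--         if has_special:
--             return special_name
--         else:
--             return
--     if ln == 1: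
--         if has_special:
--             return '%s and %s' % (special_name, collection[0])
--         else:
--             return collection[0]
--     if ln - limit == 1:
--         limit += 1
--     if ln <= limit:
--         if has_special:
--             return '%s, %s and %s' % (special_name, jcs(collection[:-1]), collection[(-1)])
--         return '%s and %s' % (jcs(collection[:-1]), collection[(-1)])
--     else:
--         if has_special:
--             return '%s, %s and %d other%s' % (special_name, jcs(collection[:limit]), ln - limit, 's' if ln - limit > 1 else '')
--         return '%s and %d other%s' % (jcs(collection[:limit]), ln - limit, 's' if ln - limit > 1 else '')
-- ===== SOURCE B (Python) =====
-- def list_sample_special(collection, special_item, special_name='you', limit=3):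
--     # Like A, mutates `collection` in place (removes the first occurrence of special_item).
--     try:
--         collection.remove(special_item)
--         lead = special_name
--         limit -= 1
--     except ValueError:
--         lead = None
--     ln = len(collection)
--     if ln == 0:
--         return lead
--     k = ln - limit
--     if ln < 2 or k < 2:
--         shown, tail = collection[:-1], collection[-1]
--     else:
--         shown, tail = collection[:limit], '%d others' % k
--     if lead is None and not shown:
--         return tail  # lone piece is returned as-is
--     # back-to-front: collect the pieces in reverse order, carrying the separator
--     # that belongs before the piece just written (' and ' before the last, ', ' elsewhere)
--     out = [str(tail)]
--     sep = ' and '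
--     for item in reversed(shown):
--         out.append(sep)
--         out.append(str(item))
--         sep = ', '
--     if lead is not None:
--         out.append(sep)
--         out.append(lead)
--     return ''.join(reversed(out))
-- ===== Notes on version B (the rewrite author's own statement) =====
-- stated objective: simpler
-- what changed: A's four %-format branches with an inner ', '.join and slicing are replaced by one back-to-front pass that emits the pieces in reverse order with a carried separator (' and ' before the last piece, ', ' elsewhere), an optional lead prefix, and a single final join.
-- intended difference: When at least 2 items remain after removing the special item but the decremented limit is 0 or <= -(remaining length) so that collection[:limit] is empty, A splices an empty join into its format string and returns a dangling-separator string like ' and 2 others' / 'you, and 2 others', while B returns the intended '2 others' / 'you and 2 others'. — e.g. on list_sample_special(["a", "b"], "x", "you", 0): A returns some " and 2 others", B returns some "2 others"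
import Mathlib
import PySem

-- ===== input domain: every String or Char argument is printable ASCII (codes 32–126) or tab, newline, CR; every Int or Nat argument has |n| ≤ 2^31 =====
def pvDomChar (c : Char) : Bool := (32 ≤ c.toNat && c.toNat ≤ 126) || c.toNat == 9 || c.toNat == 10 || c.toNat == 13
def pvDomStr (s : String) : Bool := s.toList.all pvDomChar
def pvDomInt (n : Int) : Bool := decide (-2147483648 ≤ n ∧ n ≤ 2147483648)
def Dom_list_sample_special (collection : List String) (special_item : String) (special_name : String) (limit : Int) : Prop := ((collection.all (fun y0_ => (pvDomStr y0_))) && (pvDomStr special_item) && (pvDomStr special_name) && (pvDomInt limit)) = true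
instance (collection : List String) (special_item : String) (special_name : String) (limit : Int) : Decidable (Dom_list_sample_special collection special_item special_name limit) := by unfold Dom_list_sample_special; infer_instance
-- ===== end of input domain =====

-- B replaces A's four %-format branches (inner ', '.join plus slicing) by one back-to-front
-- pass that emits the pieces in reverse order with a carried separator and one final join ('simpler' objective).
-- Like A, the Python B removes special_item from the caller's list in place; the equivalence here is about the return value.

-- ===== PORT A =====
-- ', '.join(str(item) for item in items): items are strings here, so str is the identity
def jcs (items : List String) : String := PySem.Str.join ", " items

def list_sample_special (collection : List String) (special_item : String) (special_name : String) (limit : Int) : Option String :=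
  -- try: collection.remove(special_item) … except ValueError
  let st := match PySem.List.remove? collection special_item with
    | some c => (c, true, limit - 1)
    | none   => (collection, false, limit)
  let coll := st.1
  let has_special := st.2.1
  let limit := st.2.2
  let ln : Int := coll.length
  if ln = 0 then
    if has_special then some special_name else none
  else if ln = 1 then
    if has_special then some (special_name ++ " and " ++ (PySem.List.pyGet? coll 0).getD "")
    else some ((PySem.List.pyGet? coll 0).getD "")
  else
    let limit := if ln - limit = 1 then limit + 1 else limit
    if ln ≤ limit then
      if has_special then
        some (special_name ++ ", " ++ jcs (PySem.List.slice coll none (some (-1))) ++ " and " ++ (PySem.List.pyGet? coll (-1)).getD "")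
      else
        some (jcs (PySem.List.slice coll none (some (-1))) ++ " and " ++ (PySem.List.pyGet? coll (-1)).getD "")
    else
      if has_special then
        some (special_name ++ ", " ++ jcs (PySem.List.slice coll none (some limit)) ++ " and " ++ PySem.Int.toStr (ln - limit) ++ " other" ++ (if ln - limit > 1 then "s" else ""))
      else
        some (jcs (PySem.List.slice coll none (some limit)) ++ " and " ++ PySem.Int.toStr (ln - limit) ++ " other" ++ (if ln - limit > 1 then "s" else ""))

-- ===== PORT B =====
-- body of Source B's for-loop: out.append(sep); out.append(item); sep = ', '
def pvStep (st : List String × String) (item : String) : List String × String :=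
  (st.1 ++ [st.2, item], ", ")

def list_sample_special_alt (collection : List String) (special_item : String) (special_name : String) (limit : Int) : Option String :=
  let st := match PySem.List.remove? collection special_item with
    | some c => (c, some special_name, limit - 1)
    | none   => (collection, (none : Option String), limit)
  let coll := st.1
  let lead := st.2.1
  let limit := st.2.2
  let ln : Int := coll.length
  if ln = 0 then lead
  else
    let k := ln - limit
    let p : List String × String :=
      if ln < 2 ∨ k < 2 then
        (PySem.List.slice coll none (some (-1)), (PySem.List.pyGet? coll (-1)).getD "")
      else
        (PySem.List.slice coll none (some limit), PySem.Int.toStr k ++ " others")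
    if lead.isNone ∧ p.1 = [] then some p.2
    else
      let r := p.1.reverse.foldl pvStep ([p.2], " and ")
      let out := match lead with
        | some l => r.1 ++ [r.2, l]
        | none   => r.1
      some (PySem.Str.join "" out.reverse)

-- ===== PRECONDITION & SPEC =====
-- When the effective limit leaves no item to show (at least 2 items remain after the removal and the
-- decremented limit is 0 or ≤ -(remaining length), so collection[:limit] is empty), A splices an empty
-- join into its format string and returns a dangling-separator string like ' and 4 others' /
-- 'you,  and 4 others'; B returns the intended phrasing '4 others' / 'you and 4 others'.
def D_list_sample_special (collection : List String) (special_item : String) (special_name : String) (limit : Int) : Prop :=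
  ((2 : Int) ≤ collection.length - (if special_item ∈ collection then 1 else 0)) ∧
  ((limit - (if special_item ∈ collection then 1 else 0) = 0) ∨
   (limit - (if special_item ∈ collection then 1 else 0) + (collection.length - (if special_item ∈ collection then 1 else 0)) ≤ 0))
instance (collection : List String) (special_item : String) (special_name : String) (limit : Int) : Decidable (D_list_sample_special collection special_item special_name limit) := by unfold D_list_sample_special; infer_instance

def Spec_list_sample_special (collection : List String) (special_item : String) (special_name : String) (limit : Int) (out : Option String) : Prop := ¬ D_list_sample_special collection special_item special_name limit → out = list_sample_special_alt collection special_item special_name limit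
instance (collection : List String) (special_item : String) (special_name : String) (limit : Int) (out : Option String) : Decidable (Spec_list_sample_special collection special_item special_name limit out) := by unfold Spec_list_sample_special; infer_instance

def pvDiffWitness_list_sample_special : List String × String × String × Int := (["a", "b"], "x", "you", 0)
def pvDiffWitnessOut_list_sample_special : (Option String) × (Option String) := (some " and 2 others", some "2 others")

-- ===== CLAIM (what is proved, stated in full; the proofs are below) =====
def Claim_unchanged_list_sample_special : Prop := ∀ (collection : List String) (special_item : String) (special_name : String) (limit : Int), Dom_list_sample_special collection special_item special_name limit → Spec_list_sample_special collection special_item special_name limit (list_sample_special collection special_item special_name limit)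
def Claim_changed_list_sample_special : Prop := Dom_list_sample_special (pvDiffWitness_list_sample_special.1) (pvDiffWitness_list_sample_special.2.1) (pvDiffWitness_list_sample_special.2.2.1) (pvDiffWitness_list_sample_special.2.2.2) ∧ D_list_sample_special (pvDiffWitness_list_sample_special.1) (pvDiffWitness_list_sample_special.2.1) (pvDiffWitness_list_sample_special.2.2.1) (pvDiffWitness_list_sample_special.2.2.2) ∧ list_sample_special (pvDiffWitness_list_sample_special.1) (pvDiffWitness_list_sample_special.2.1) (pvDiffWitness_list_sample_special.2.2.1) (pvDiffWitness_list_sample_special.2.2.2) = pvDiffWitnessOut_list_sample_special.1 ∧ list_sample_special_alt (pvDiffWitness_list_sample_special.1) (pvDiffWitness_list_sample_special.2.1) (pvDiffWitness_list_sample_special.2.2.1) (pvDiffWitness_list_sample_special.2.2.2) = pvDiffWitnessOut_list_sample_special.2 ∧ pvDiffWitnessOut_list_sample_special.1 ≠ pvDiffWitnessOut_list_sample_special.2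

def Claim_exact_list_sample_special : Prop := ∀ (collection : List String) (special_item : String) (special_name : String) (limit : Int), Dom_list_sample_special collection special_item special_name limit → D_list_sample_special collection special_item special_name limit → list_sample_special collection special_item special_name limit ≠ list_sample_special_alt collection special_item special_name limit

-- ===== LEMMAS AND PROOFS =====
theorem pvJoin_singleton (x : String) : PySem.Str.join ", " [x] = x := by
  simp [PySem.Str.join, PySem.Chars.join, List.intercalate]

theorem pvJoin_cons (x y : String) (ys : List String) :
    PySem.Str.join ", " (x :: y :: ys) = x ++ ", " ++ PySem.Str.join ", " (y :: ys) := by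
  apply String.toList_injective
  rw [PySem.Str.toList_join, List.map_cons, List.map_cons, PySem.Chars.join_cons_cons]
  simp [PySem.Str.toList_join]

-- ''.join with empty separator is concatenation, one piece at a time
theorem pvJoin0_nil : PySem.Str.join "" ([] : List String) = "" := by decide

theorem pvJoin0_cons (x : String) (l : List String) :
    PySem.Str.join "" (x :: l) = x ++ PySem.Str.join "" l := by
  cases l with
  | nil =>
    apply String.toList_injective
    simp [PySem.Str.toList_join, PySem.Chars.join, List.intercalate]
  | cons y ys =>
    apply String.toList_injective
    rw [PySem.Str.toList_join, List.map_cons, List.map_cons, PySem.Chars.join_cons_cons]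
    simp [PySem.Str.toList_join]

-- the back-to-front pass: what the collected pieces join to, and what separator it leaves
theorem pvFold_spec (shown : List String) (t : String) :
    PySem.Str.join "" ((shown.reverse.foldl pvStep ([t], " and ")).1.reverse) =
      (if shown = [] then t else PySem.Str.join ", " shown ++ " and " ++ t) ∧
    (shown.reverse.foldl pvStep ([t], " and ")).2 = (if shown = [] then " and " else ", ") := by
  induction shown with
  | nil => simp [pvJoin0_cons, pvJoin0_nil]
  | cons x rest ih =>
    rw [List.reverse_cons, List.foldl_append]
    rcases ih with ⟨ih1, ih2⟩
    constructor
    · simp only [pvStep, List.foldl_cons, List.foldl_nil, List.reverse_append,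
        List.reverse_cons, List.reverse_nil]
      simp only [List.cons_append, List.nil_append]
      rw [pvJoin0_cons, pvJoin0_cons, ih2, ih1]
      cases rest with
      | nil => simp [pvJoin_singleton, String.append_assoc]
      | cons y ys => simp [pvJoin_cons, String.append_assoc]
    · simp [pvStep]

def pvDisp (coll : List String) (limit : Int) : List String × String :=
  if (coll.length : Int) < 2 ∨ (coll.length : Int) - limit < 2 then
    (PySem.List.slice coll none (some (-1)), (PySem.List.pyGet? coll (-1)).getD "")
  else
    (PySem.List.slice coll none (some limit), PySem.Int.toStr ((coll.length : Int) - limit) ++ " others")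

theorem pvShown_ne_nil (coll : List String) (limit : Int) (h2 : 2 ≤ coll.length)
    (h0 : limit ≠ 0) (hp : 0 < limit + (coll.length : Int)) :
    PySem.List.slice coll none (some limit) ≠ [] := by
  intro he
  have hl := congrArg List.length he
  rw [← PySem.List.slice_zero_start, PySem.List.length_slice] at hl
  simp [PySem.List.clampIdx] at hl
  by_cases hneg : limit < 0
  · rw [if_pos hneg, if_neg (by omega)] at hl
    omega
  · rw [if_neg hneg] at hl
    omega

-- B's tail computation, lead = none
theorem pvCoreNone (coll : List String) (limit : Int)
    (hD : ¬ ((2:Int) ≤ (coll.length : Int) ∧ (limit = 0 ∨ limit + (coll.length : Int) ≤ 0))) :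
    (if (coll.length : Int) = 0 then none
     else if (coll.length : Int) = 1 then some ((PySem.List.pyGet? coll 0).getD "")
     else if (coll.length : Int) ≤ (if (coll.length : Int) - limit = 1 then limit + 1 else limit) then
       some (jcs (PySem.List.slice coll none (some (-1))) ++ " and " ++ (PySem.List.pyGet? coll (-1)).getD "")
     else
       some (jcs (PySem.List.slice coll none (some (if (coll.length : Int) - limit = 1 then limit + 1 else limit))) ++ " and " ++
         PySem.Int.toStr ((coll.length : Int) - (if (coll.length : Int) - limit = 1 then limit + 1 else limit)) ++ " other" ++
         (if ((coll.length : Int) - (if (coll.length : Int) - limit = 1 then limit + 1 else limit)) > 1 then "s" else ""))) =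
    (if (coll.length : Int) = 0 then none
     else if (none : Option String).isNone ∧ (pvDisp coll limit).1 = [] then some (pvDisp coll limit).2
     else some (PySem.Str.join ""
       (((pvDisp coll limit).1.reverse.foldl pvStep ([(pvDisp coll limit).2], " and ")).1.reverse))) := by
  match coll with
  | [] => simp
  | [x] => simp [pvDisp, PySem.List.slice_to_neg_one, PySem.List.pyGet?_neg_one]
  | x :: y :: rest =>
    have hge : 2 ≤ (x :: y :: rest).length := by simp
    have hc0 : ¬ (((x :: y :: rest).length : Int) = 0) := by omega
    have hc1 : ¬ (((x :: y :: rest).length : Int) = 1) := by omega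
    unfold pvDisp
    rw [if_neg hc0, if_neg hc0, if_neg hc1]
    by_cases hk : ((x :: y :: rest).length : Int) - limit < 2
    · have hne : PySem.List.slice (x :: y :: rest) none (some (-1)) ≠ [] := by
        simp [PySem.List.slice_to_neg_one]
      rw [if_pos (show ((x :: y :: rest).length : Int) ≤
              (if ((x :: y :: rest).length : Int) - limit = 1 then limit + 1 else limit) by
            split_ifs <;> omega),
          if_pos (Or.inr hk),
          if_neg (show ¬ (((none : Option String).isNone = true) ∧
              PySem.List.slice (x :: y :: rest) none (some (-1)) = []) by simp [hne]),
          (pvFold_spec (PySem.List.slice (x :: y :: rest) none (some (-1)))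
            ((PySem.List.pyGet? (x :: y :: rest) (-1)).getD "")).1,
          if_neg hne]
      rfl
    · have h0 : limit ≠ 0 := fun h => hD ⟨by omega, Or.inl h⟩
      have hp : (0:Int) < limit + ((x :: y :: rest).length : Int) := by
        by_contra hq
        exact hD ⟨by omega, Or.inr (by omega)⟩
      have hne := pvShown_ne_nil (x :: y :: rest) limit hge h0 hp
      rw [if_neg (show ¬ ((x :: y :: rest).length : Int) ≤
              (if ((x :: y :: rest).length : Int) - limit = 1 then limit + 1 else limit) by
            rw [if_neg (by omega)]; omega),
          if_neg (show ¬ (((x :: y :: rest).length : Int) < 2 ∨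
            ((x :: y :: rest).length : Int) - limit < 2) by omega),
          if_neg (show ¬ (((none : Option String).isNone = true) ∧
              PySem.List.slice (x :: y :: rest) none (some limit) = []) by simp [hne]),
          (pvFold_spec (PySem.List.slice (x :: y :: rest) none (some limit))
            (PySem.Int.toStr (((x :: y :: rest).length : Int) - limit) ++ " others")).1,
          if_neg hne,
          if_neg (show ¬ (((x :: y :: rest).length : Int) - limit = 1) by omega),
          if_pos (show (((x :: y :: rest).length : Int) - limit) > 1 by omega)]
      simp [jcs, String.append_assoc, show (" other" ++ "s" : String) = " others" from by decide]

-- B's tail computation, lead = some sn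
theorem pvCoreSome (coll : List String) (sn : String) (limit : Int)
    (hD : ¬ ((2:Int) ≤ (coll.length : Int) ∧ (limit = 0 ∨ limit + (coll.length : Int) ≤ 0))) :
    (if (coll.length : Int) = 0 then some sn
     else if (coll.length : Int) = 1 then some (sn ++ " and " ++ (PySem.List.pyGet? coll 0).getD "")
     else if (coll.length : Int) ≤ (if (coll.length : Int) - limit = 1 then limit + 1 else limit) then
       some (sn ++ ", " ++ jcs (PySem.List.slice coll none (some (-1))) ++ " and " ++ (PySem.List.pyGet? coll (-1)).getD "")
     else
       some (sn ++ ", " ++ jcs (PySem.List.slice coll none (some (if (coll.length : Int) - limit = 1 then limit + 1 else limit))) ++ " and " ++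
         PySem.Int.toStr ((coll.length : Int) - (if (coll.length : Int) - limit = 1 then limit + 1 else limit)) ++ " other" ++
         (if ((coll.length : Int) - (if (coll.length : Int) - limit = 1 then limit + 1 else limit)) > 1 then "s" else ""))) =
    (if (coll.length : Int) = 0 then some sn
     else if (some sn).isNone ∧ (pvDisp coll limit).1 = [] then some (pvDisp coll limit).2
     else some (PySem.Str.join ""
       ((((pvDisp coll limit).1.reverse.foldl pvStep ([(pvDisp coll limit).2], " and ")).1 ++
         [((pvDisp coll limit).1.reverse.foldl pvStep ([(pvDisp coll limit).2], " and ")).2, sn]).reverse))) := by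
  match coll with
  | [] => simp
  | [x] =>
    simp [pvDisp, PySem.List.slice_to_neg_one, PySem.List.pyGet?_neg_one,
      pvJoin0_cons, pvJoin0_nil, String.append_assoc]
  | x :: y :: rest =>
    have hge : 2 ≤ (x :: y :: rest).length := by simp
    have hc0 : ¬ (((x :: y :: rest).length : Int) = 0) := by omega
    have hc1 : ¬ (((x :: y :: rest).length : Int) = 1) := by omega
    unfold pvDisp
    rw [if_neg hc0, if_neg hc0, if_neg hc1]
    by_cases hk : ((x :: y :: rest).length : Int) - limit < 2
    · have hne : PySem.List.slice (x :: y :: rest) none (some (-1)) ≠ [] := by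
        simp [PySem.List.slice_to_neg_one]
      have hf := pvFold_spec (PySem.List.slice (x :: y :: rest) none (some (-1)))
        ((PySem.List.pyGet? (x :: y :: rest) (-1)).getD "")
      rw [if_neg hne, if_neg hne] at hf
      rw [if_pos (show ((x :: y :: rest).length : Int) ≤
              (if ((x :: y :: rest).length : Int) - limit = 1 then limit + 1 else limit) by
            split_ifs <;> omega),
          if_pos (Or.inr hk),
          if_neg (show ¬ (((some sn).isNone = true) ∧
              PySem.List.slice (x :: y :: rest) none (some (-1)) = []) by simp),
          List.reverse_append]
      simp only [List.reverse_cons, List.reverse_nil, List.nil_append, List.cons_append,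
        pvJoin0_cons, hf.1, hf.2]
      simp [jcs, String.append_assoc]
    · have h0 : limit ≠ 0 := fun h => hD ⟨by omega, Or.inl h⟩
      have hp : (0:Int) < limit + ((x :: y :: rest).length : Int) := by
        by_contra hq
        exact hD ⟨by omega, Or.inr (by omega)⟩
      have hne := pvShown_ne_nil (x :: y :: rest) limit hge h0 hp
      have hf := pvFold_spec (PySem.List.slice (x :: y :: rest) none (some limit))
        (PySem.Int.toStr (((x :: y :: rest).length : Int) - limit) ++ " others")
      rw [if_neg hne, if_neg hne] at hf
      rw [if_neg (show ¬ ((x :: y :: rest).length : Int) ≤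
              (if ((x :: y :: rest).length : Int) - limit = 1 then limit + 1 else limit) by
            rw [if_neg (by omega)]; omega),
          if_neg (show ¬ (((x :: y :: rest).length : Int) < 2 ∨
            ((x :: y :: rest).length : Int) - limit < 2) by omega),
          if_neg (show ¬ (((some sn).isNone = true) ∧
              PySem.List.slice (x :: y :: rest) none (some limit) = []) by simp),
          List.reverse_append,
          if_neg (show ¬ (((x :: y :: rest).length : Int) - limit = 1) by omega),
          if_pos (show (((x :: y :: rest).length : Int) - limit) > 1 by omega)]
      simp only [List.reverse_cons, List.reverse_nil, List.nil_append, List.cons_append,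
        pvJoin0_cons, hf.1, hf.2]
      simp [jcs, String.append_assoc, show (" other" ++ "s" : String) = " others" from by decide]

theorem pvShown_eq_nil (coll : List String) (limit : Int) (h2 : (2:Int) ≤ (coll.length : Int))
    (hd : limit = 0 ∨ limit + (coll.length : Int) ≤ 0) :
    PySem.List.slice coll none (some limit) = [] := by
  apply List.eq_nil_of_length_eq_zero
  rw [← PySem.List.slice_zero_start, PySem.List.length_slice]
  simp [PySem.List.clampIdx]
  rcases hd with h | h
  · subst h
    simp
  · rw [if_pos (show limit < 0 by omega)]
    split_ifs with hlt
    · rfl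
    · omega


-- inside the difference region the two results always differ (lead = none)
theorem pvDiffNone (coll : List String) (limit : Int)
    (h2 : (2:Int) ≤ (coll.length : Int)) (hd : limit = 0 ∨ limit + (coll.length : Int) ≤ 0) :
    (if (coll.length : Int) = 0 then none
     else if (coll.length : Int) = 1 then some ((PySem.List.pyGet? coll 0).getD "")
     else if (coll.length : Int) ≤ (if (coll.length : Int) - limit = 1 then limit + 1 else limit) then
       some (jcs (PySem.List.slice coll none (some (-1))) ++ " and " ++ (PySem.List.pyGet? coll (-1)).getD "")
     else
       some (jcs (PySem.List.slice coll none (some (if (coll.length : Int) - limit = 1 then limit + 1 else limit))) ++ " and " ++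
         PySem.Int.toStr ((coll.length : Int) - (if (coll.length : Int) - limit = 1 then limit + 1 else limit)) ++ " other" ++
         (if ((coll.length : Int) - (if (coll.length : Int) - limit = 1 then limit + 1 else limit)) > 1 then "s" else ""))) ≠
    (if (coll.length : Int) = 0 then none
     else if (none : Option String).isNone ∧ (pvDisp coll limit).1 = [] then some (pvDisp coll limit).2
     else some (PySem.Str.join ""
       (((pvDisp coll limit).1.reverse.foldl pvStep ([(pvDisp coll limit).2], " and ")).1.reverse))) := by
  have hnil := pvShown_eq_nil coll limit h2 hd
  have hb : ¬ (((coll.length : Int)) - limit = 1) := by omega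
  unfold pvDisp
  rw [if_neg (show ¬ ((coll.length : Int) = 0) by omega),
      if_neg (show ¬ ((coll.length : Int) = 0) by omega),
      if_neg (show ¬ ((coll.length : Int) = 1) by omega),
      if_neg (show ¬ ((coll.length : Int) ≤
          (if (coll.length : Int) - limit = 1 then limit + 1 else limit)) by
        rw [if_neg hb]; omega),
      if_neg hb,
      if_pos (show (((coll.length : Int) - limit) > 1) by omega),
      if_neg (show ¬ ((coll.length : Int) < 2 ∨ (coll.length : Int) - limit < 2) by omega),
      if_pos (show ((none : Option String).isNone = true) ∧
          PySem.List.slice coll none (some limit) = [] from ⟨rfl, hnil⟩),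
      hnil]
  intro heq
  have hlen := congrArg (fun o => ((o.getD "").toList.length : Int)) heq
  simp [jcs, show PySem.Str.join ", " ([] : List String) = "" from by decide,
    String.toList_append] at hlen
  omega

-- inside the difference region the two results always differ (lead = some sn)
theorem pvDiffSome (coll : List String) (sn : String) (limit : Int)
    (h2 : (2:Int) ≤ (coll.length : Int)) (hd : limit = 0 ∨ limit + (coll.length : Int) ≤ 0) :
    (if (coll.length : Int) = 0 then some sn
     else if (coll.length : Int) = 1 then some (sn ++ " and " ++ (PySem.List.pyGet? coll 0).getD "")
     else if (coll.length : Int) ≤ (if (coll.length : Int) - limit = 1 then limit + 1 else limit) then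
       some (sn ++ ", " ++ jcs (PySem.List.slice coll none (some (-1))) ++ " and " ++ (PySem.List.pyGet? coll (-1)).getD "")
     else
       some (sn ++ ", " ++ jcs (PySem.List.slice coll none (some (if (coll.length : Int) - limit = 1 then limit + 1 else limit))) ++ " and " ++
         PySem.Int.toStr ((coll.length : Int) - (if (coll.length : Int) - limit = 1 then limit + 1 else limit)) ++ " other" ++
         (if ((coll.length : Int) - (if (coll.length : Int) - limit = 1 then limit + 1 else limit)) > 1 then "s" else ""))) ≠
    (if (coll.length : Int) = 0 then some sn
     else if (some sn).isNone ∧ (pvDisp coll limit).1 = [] then some (pvDisp coll limit).2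
     else some (PySem.Str.join ""
       ((((pvDisp coll limit).1.reverse.foldl pvStep ([(pvDisp coll limit).2], " and ")).1 ++
         [((pvDisp coll limit).1.reverse.foldl pvStep ([(pvDisp coll limit).2], " and ")).2, sn]).reverse))) := by
  have hnil := pvShown_eq_nil coll limit h2 hd
  have hb : ¬ (((coll.length : Int)) - limit = 1) := by omega
  unfold pvDisp
  rw [if_neg (show ¬ ((coll.length : Int) = 0) by omega),
      if_neg (show ¬ ((coll.length : Int) = 0) by omega),
      if_neg (show ¬ ((coll.length : Int) = 1) by omega),
      if_neg (show ¬ ((coll.length : Int) ≤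
          (if (coll.length : Int) - limit = 1 then limit + 1 else limit)) by
        rw [if_neg hb]; omega),
      if_neg hb,
      if_pos (show (((coll.length : Int) - limit) > 1) by omega),
      if_neg (show ¬ ((coll.length : Int) < 2 ∨ (coll.length : Int) - limit < 2) by omega),
      if_neg (show ¬ (((some sn).isNone = true) ∧
          PySem.List.slice coll none (some limit) = []) by simp),
      hnil]
  intro heq
  have hlen := congrArg (fun o => ((o.getD "").toList.length : Int)) heq
  simp [jcs, pvJoin0_cons, pvJoin0_nil,
    show PySem.Str.join ", " ([] : List String) = "" from by decide,
    String.toList_append] at hlen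
  omega

-- ===== VERDICT (by name: the statement is the Claim_ definition above) =====
theorem list_sample_special_spec : Claim_unchanged_list_sample_special := by
  intro collection si sn limit _ hnd
  cases hrem : PySem.List.remove? collection si with
  | none =>
    have hmem : si ∉ collection := (PySem.List.remove?_eq_none_iff _ _).mp hrem
    unfold D_list_sample_special at hnd
    rw [if_neg hmem] at hnd
    simp only [list_sample_special, list_sample_special_alt, hrem]
    exact pvCoreNone collection limit (fun hcon => hnd (by omega))
  | some c =>
    have hmem : si ∈ collection := by
      by_contra h
      rw [(PySem.List.remove?_eq_none_iff _ _).mpr h] at hrem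
      cases hrem
    have hc : c = collection.erase si := by
      have he := PySem.List.remove?_eq_some_erase collection si hmem
      rw [hrem] at he
      exact Option.some_injective _ he
    have hlen : c.length + 1 = collection.length := by
      subst hc
      rw [List.length_erase_of_mem hmem]
      have hne : collection ≠ [] := List.ne_nil_of_mem hmem
      have h1 : 1 ≤ collection.length := List.length_pos_of_ne_nil hne
      omega
    unfold D_list_sample_special at hnd
    rw [if_pos hmem] at hnd
    simp only [list_sample_special, list_sample_special_alt, hrem]
    exact pvCoreSome c sn (limit - 1) (fun hcon => hnd (by omega))

theorem list_sample_special_changed : Claim_changed_list_sample_special := by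
  unfold Claim_changed_list_sample_special; decide

theorem list_sample_special_tight : Claim_exact_list_sample_special := by
  intro collection si sn limit _ hd
  cases hrem : PySem.List.remove? collection si with
  | none =>
    have hmem : si ∉ collection := (PySem.List.remove?_eq_none_iff _ _).mp hrem
    unfold D_list_sample_special at hd
    rw [if_neg hmem] at hd
    simp only [list_sample_special, list_sample_special_alt, hrem]
    exact pvDiffNone collection limit (by omega) (by omega)
  | some c =>
    have hmem : si ∈ collection := by
      by_contra h
      rw [(PySem.List.remove?_eq_none_iff _ _).mpr h] at hrem
      cases hrem
    have hc : c = collection.erase si := by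
      have he := PySem.List.remove?_eq_some_erase collection si hmem
      rw [hrem] at he
      exact Option.some_injective _ he
    have hlen : c.length + 1 = collection.length := by
      subst hc
      rw [List.length_erase_of_mem hmem]
      have hne : collection ≠ [] := List.ne_nil_of_mem hmem
      have h1 : 1 ≤ collection.length := List.length_pos_of_ne_nil hne
      omega
    unfold D_list_sample_special at hd
    rw [if_pos hmem] at hd
    simp only [list_sample_special, list_sample_special_alt, hrem]
    exact pvDiffSome c sn (limit - 1) (by omega) (by omega)
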